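-- pv_equiv track=rewrite | github.com/Python-Skill/bagels | main.py | input_check
-- ===== SOURCE A (Python) =====
-- def input_check(value: str):
--     correct_values = ['0', '1', '2', '3', '4', '5', '6', '7', '8', '9']
--
--     if len(value) != 3:
--         return False
--
--     for i in value:
--         if i not in correct_values:
--             return False
--
--     if value[0] == '0':
--         return False
--
--     return True
-- ===== SOURCE B (Python) =====
-- VALID = {str(n) for n in range(100, 1000)}
--
--
-- def input_check(value: str):
--     return value in VALID
-- ===== Notes on version B (the rewrite author's own statement) =====
-- stated objective: alternative
-- what changed: Replaces the length guard, per-character digit loop and leading-zero check with a single membership test in a set of the 900 valid strings precomputed once from range(100, 1000).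
import Mathlib
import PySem

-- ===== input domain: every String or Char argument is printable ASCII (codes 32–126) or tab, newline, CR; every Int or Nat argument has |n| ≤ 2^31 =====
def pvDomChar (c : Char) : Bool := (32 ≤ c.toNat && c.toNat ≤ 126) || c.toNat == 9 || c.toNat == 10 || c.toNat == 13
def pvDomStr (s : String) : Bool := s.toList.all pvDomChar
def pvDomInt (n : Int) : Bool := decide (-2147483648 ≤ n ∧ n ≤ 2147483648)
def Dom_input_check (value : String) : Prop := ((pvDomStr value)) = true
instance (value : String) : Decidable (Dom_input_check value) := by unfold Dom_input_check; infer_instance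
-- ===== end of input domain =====

-- B replaces A's length guard, per-character digit loop and leading-zero check by one
-- membership test in a set of the 900 valid strings precomputed from range(100, 1000).

-- ===== PORT A =====
def correctValues : List String := ["0", "1", "2", "3", "4", "5", "6", "7", "8", "9"]

def input_check (value : String) : Bool :=
  if PySem.Str.len value ≠ 3 then false
  else if ¬ (value.toList.all (fun i => correctValues.contains (String.ofList [i]))) then false
  else if PySem.Str.pyGet? value 0 = some '0' then false
  else true

-- ===== PORT B =====
def pvValid : PySem.Set String :=
  PySem.Set.ofList ((PySem.List.pyRange 100 1000 1).map PySem.Int.toStr)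

def input_check_alt (value : String) : Bool := PySem.Set.contains pvValid value

-- ===== PRECONDITION & SPEC =====
def Spec_input_check (value : String) (out : Bool) : Prop := out = input_check_alt value
instance (value : String) (out : Bool) : Decidable (Spec_input_check value out) := by unfold Spec_input_check; infer_instance

-- ===== CLAIM (what is proved, stated in full; the proofs are below) =====
def Claim_equal_input_check : Prop := ∀ (value : String), Dom_input_check value → Spec_input_check value (input_check value)

-- ===== LEMMAS AND PROOFS =====
def digitChars : List Char := ['0', '1', '2', '3', '4', '5', '6', '7', '8', '9']

-- B accepts exactly the strings of the precomputed table
lemma contains_ofList {α : Type} [BEq α] [LawfulBEq α] (xs : List α) (v : α) :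
    PySem.Set.contains (PySem.Set.ofList xs) v = true ↔ v ∈ xs := by
  simp [PySem.Set.contains, PySem.Set.mem_ofList]

lemma alt_true_iff (value : String) :
    input_check_alt value = true ↔
      value ∈ (PySem.List.pyRange 100 1000 1).map PySem.Int.toStr := by
  unfold input_check_alt pvValid
  exact contains_ofList _ _

-- A accepts every string of the table
set_option maxRecDepth 20000 in
lemma A_of_mem : ∀ s ∈ (PySem.List.pyRange 100 1000 1).map PySem.Int.toStr,
    input_check s = true := by decide

-- str(m + 100) for 0 ≤ m < 900 is exactly its three decimal-digit characters
set_option maxRecDepth 20000 in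
lemma toStr_digits : ∀ m ∈ List.range 900,
    PySem.Int.toChars ((m : Int) + 100) =
      [Char.ofNat (48 + (m + 100) / 100), Char.ofNat (48 + ((m + 100) / 10) % 10),
       Char.ofNat (48 + (m + 100) % 10)] := by decide

lemma digit_facts : ∀ a ∈ digitChars,
    ∃ d : Nat, d ≤ 9 ∧ a.toNat = 48 + d ∧ Char.ofNat a.toNat = a ∧ (a ≠ '0' → 1 ≤ d) := by
  intro a ha
  fin_cases ha
  · exact ⟨0, by omega, rfl, rfl, fun h => absurd rfl h⟩
  · exact ⟨1, by omega, rfl, rfl, fun _ => by omega⟩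
  · exact ⟨2, by omega, rfl, rfl, fun _ => by omega⟩
  · exact ⟨3, by omega, rfl, rfl, fun _ => by omega⟩
  · exact ⟨4, by omega, rfl, rfl, fun _ => by omega⟩
  · exact ⟨5, by omega, rfl, rfl, fun _ => by omega⟩
  · exact ⟨6, by omega, rfl, rfl, fun _ => by omega⟩
  · exact ⟨7, by omega, rfl, rfl, fun _ => by omega⟩
  · exact ⟨8, by omega, rfl, rfl, fun _ => by omega⟩
  · exact ⟨9, by omega, rfl, rfl, fun _ => by omega⟩

lemma mk_mem (i : Char) (h : correctValues.contains (String.ofList [i]) = true) :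
    i ∈ digitChars := by
  rw [List.contains_iff_mem] at h
  simp [correctValues] at h
  rcases h with h|h|h|h|h|h|h|h|h|h <;>
    (have h2 := congrArg String.toList h; simp at h2; simp [digitChars, h2])

-- every string A accepts is str(n) for some 100 ≤ n < 1000
lemma mem_of_A (value : String) (h : input_check value = true) :
    value ∈ (PySem.List.pyRange 100 1000 1).map PySem.Int.toStr := by
  unfold input_check at h
  split_ifs at h with h1 h2 h3
  rw [PySem.Str.len_eq] at h1
  have hlen : value.toList.length = 3 := by omega
  obtain ⟨a, b, c, habc⟩ := List.length_eq_three.mp hlen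
  rw [List.all_eq_true] at h2
  obtain ⟨dA, hdA9, hAval, hAof, hA1⟩ := digit_facts a (mk_mem a (h2 a (by rw [habc]; simp)))
  obtain ⟨dB, hdB9, hBval, hBof, _⟩ := digit_facts b (mk_mem b (h2 b (by rw [habc]; simp)))
  obtain ⟨dC, hdC9, hCval, hCof, _⟩ := digit_facts c (mk_mem c (h2 c (by rw [habc]; simp)))
  have h0 : PySem.Str.pyGet? value 0 = some a := by
    simp [pysem, habc]
  have ha0 : a ≠ '0' := by
    intro hh
    exact h3 (by rw [h0, hh])
  have ha9 := hA1 ha0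
  have m0 : 100 * dA + 10 * dB + dC - 100 < 900 := by omega
  set m := 100 * dA + 10 * dB + dC - 100 with hm
  have htd := toStr_digits m (by rw [List.mem_range]; exact m0)
  have e1 : 48 + (m + 100) / 100 = a.toNat := by omega
  have e2 : 48 + ((m + 100) / 10) % 10 = b.toNat := by omega
  have e3 : 48 + (m + 100) % 10 = c.toNat := by omega
  rw [e1, e2, e3, hAof, hBof, hCof] at htd
  refine List.mem_map.mpr ⟨(m : Int) + 100, ?_, ?_⟩
  · rw [PySem.List.mem_pyRange_one]
    constructor <;> [push_cast; push_cast] <;> omega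
  · have : (PySem.Int.toStr ((m : Int) + 100)).toList = value.toList := by
      rw [PySem.Int.toList_toStr, htd, habc]
    exact String.toList_inj.mp this

-- ===== VERDICT (by name: the statement is the Claim_ definition above) =====
theorem input_check_spec : Claim_equal_input_check := by
  intro value _
  unfold Spec_input_check
  by_cases h : input_check value = true
  · rw [h, Eq.comm, alt_true_iff]; exact mem_of_A value h
  · rw [Bool.not_eq_true] at h
    rw [h, Eq.comm, Bool.eq_false_iff]
    intro hc
    rw [alt_true_iff] at hc
    rw [A_of_mem value hc] at h
    exact Bool.true_eq_false ▸ h
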